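-- pv_equiv track=rewrite | github.com/novembertwotwo/pythonAlgo | 무지의 먹방 라이브.py | solution
-- ===== SOURCE A (Python) =====
-- from collections import deque
--
-- def solution(food_times, k):
--     q = deque()
--     for i in range(len(food_times)):
--          q.append((i+1,food_times[i]))
--     while q and k:
--         now,a = q.popleft()
--         a-=1
--         if a!=0:
--             q.append((now,a))
--         k-=1
--
--     if q:
--         return q.popleft()[0]
--     else:
--         return -1
-- ===== SOURCE B (Python) =====
-- def solution(food_times, k):
--     # Process whole round-robin rounds at once: in each full round every queued
--     # food is eaten from for one second, and a food whose time hits 0 leaves the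
--     # queue; the final partial round is resolved by direct indexing.
--     q = [(i + 1, t) for i, t in enumerate(food_times)]
--     while q and k >= len(q):
--         k -= len(q)
--         q = [(i, t - 1) for i, t in q if t != 1]
--     if not q:
--         return -1
--     return q[k][0]
-- ===== Notes on version B (the rewrite author's own statement) =====
-- stated objective: alternative
-- what changed: A rotates a deque one element per simulated second (pop, decrement, re-append, k -= 1); B processes a whole round-robin round per iteration (k -= len(q), one filtered comprehension rebuilds the queue) and resolves the final partial round by direct indexing q[k]; Pre_ excludes negative k with a nonempty list, a nonsensical input (negative elapsed seconds) on which A spins through the whole food total before returning -1.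
-- outside the precondition, e.g. on solution([3], -1): A returns -1, B returns 1
import Mathlib
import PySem

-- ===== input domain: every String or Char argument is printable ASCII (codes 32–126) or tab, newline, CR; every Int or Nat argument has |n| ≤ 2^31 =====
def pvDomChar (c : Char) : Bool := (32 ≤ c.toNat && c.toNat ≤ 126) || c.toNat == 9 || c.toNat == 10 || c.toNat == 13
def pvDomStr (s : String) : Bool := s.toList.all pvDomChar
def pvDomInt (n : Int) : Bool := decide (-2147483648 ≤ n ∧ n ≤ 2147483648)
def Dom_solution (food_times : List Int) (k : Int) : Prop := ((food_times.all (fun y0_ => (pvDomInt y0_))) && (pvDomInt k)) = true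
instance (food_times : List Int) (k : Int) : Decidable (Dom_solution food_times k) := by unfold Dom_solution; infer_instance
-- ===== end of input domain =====

-- B replaces A's one-second-per-deque-rotation simulation by a per-round batch loop
-- (subtract a whole round at once, rebuild the queue by one filtered comprehension,
-- resolve the final partial round by direct indexing) — an alternative of the same cost.

-- ===== PORT A =====
-- the deque's round-robin loop; fuel = number of iterations of `while q and k`: k of them when
-- 0 ≤ k, and when k < 0 the loop can only stop by emptying the queue, after sum(max(t,0)) visits
def solutionLoop : Nat → List (Int × Int) → List (Int × Int)
  | 0, q => q
  | _ + 1, [] => []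
  | n + 1, (now, a) :: rest =>
      let a' := a - 1
      solutionLoop n (if a' ≠ 0 then rest ++ [(now, a')] else rest)

-- the final `if q: return q.popleft()[0] else: return -1`
def headIdx (q : List (Int × Int)) : Int :=
  match q with
  | [] => -1
  | (now, _) :: _ => now

def solution (food_times : List Int) (k : Int) : Int :=
  let q := (List.range food_times.length).map
    (fun (i : Nat) => ((i : Int) + 1, PySem.List.pyGetD food_times (i : Int) 0))
  headIdx (solutionLoop (if 0 ≤ k then k.toNat else (food_times.map Int.toNat).sum) q)

-- ===== PORT B =====
-- `if not q: return -1` / `return q[k][0]` after the while loop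
def altFinish (q : List (Int × Int)) (k : Int) : Int :=
  if q = [] then -1 else ((PySem.List.pyGet? q k).getD (0, 0)).1

-- the `while q and k >= len(q)` loop; fuel: each iteration lowers k by len(q) ≥ 1,
-- and the loop body only runs while 0 ≤ k - len(q), so k.toNat + 1 iterations suffice
def altLoop : Nat → List (Int × Int) → Int → Int
  | 0, q, k => altFinish q k
  | f + 1, q, k =>
      if q ≠ [] ∧ (q.length : Int) ≤ k then
        altLoop f ((q.filter (fun p => decide (p.2 ≠ 1))).map (fun p => (p.1, p.2 - 1)))
          (k - (q.length : Int))
      else altFinish q k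

def solution_alt (food_times : List Int) (k : Int) : Int :=
  altLoop (k.toNat + 1)
    ((PySem.List.enumerate food_times 0).map (fun p => (p.1 + 1, p.2))) k

-- ===== PRECONDITION & SPEC =====
-- Pre_ excludes negative k with a nonempty list — a nonsensical input (negative elapsed
-- seconds) on which A spins through the entire food total before returning -1.
def Pre_solution (food_times : List Int) (k : Int) : Prop := 0 ≤ k ∨ food_times = []
instance (food_times : List Int) (k : Int) : Decidable (Pre_solution food_times k) := by
  unfold Pre_solution; infer_instance

def pvWitness_solution : List Int × Int := ([3, 1, 2], 5)

def Spec_solution (food_times : List Int) (k : Int) (out : Int) : Prop := out = solution_alt food_times k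
instance (food_times : List Int) (k : Int) (out : Int) : Decidable (Spec_solution food_times k out) := by unfold Spec_solution; infer_instance

-- ===== CLAIM (what is proved, stated in full; the proofs are below) =====
def Claim_equal_solution : Prop := ∀ (food_times : List Int) (k : Int), Dom_solution food_times k → Pre_solution food_times k → Spec_solution food_times k (solution food_times k)

-- ===== LEMMAS AND PROOFS =====

-- one visit of every element of q1: each gets decremented, dropped when it hits 0
def decRound (q : List (Int × Int)) : List (Int × Int) :=
  q.filterMap (fun p => if p.2 - 1 = 0 then none else some (p.1, p.2 - 1))

theorem solutionLoop_nil (n : Nat) : solutionLoop n [] = [] := by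
  cases n <;> rfl

theorem decRound_cons (i t : Int) (q : List (Int × Int)) :
    decRound ((i, t) :: q) = if t - 1 = 0 then decRound q else (i, t - 1) :: decRound q := by
  by_cases h : t - 1 = 0 <;> simp [decRound, h]

-- A's one-round effect equals B's queue rebuild
theorem decRound_eq_filter (q : List (Int × Int)) :
    decRound q = (q.filter (fun p => decide (p.2 ≠ 1))).map (fun p => (p.1, p.2 - 1)) := by
  induction q with
  | nil => rfl
  | cons x q' ih =>
    obtain ⟨i, t⟩ := x
    rw [decRound_cons, List.filter_cons]
    by_cases h : t = 1
    · rw [if_pos (by omega), ih]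
      simp [h]
    · have hd : (decide ((i, t).2 ≠ 1)) = true := by simp [h]
      rw [if_neg (by omega), hd, if_pos rfl, List.map_cons, ih]

theorem roundLemma (q1 : List (Int × Int)) : ∀ (q2 : List (Int × Int)) (f : Nat),
    solutionLoop (q1.length + f) (q1 ++ q2) = solutionLoop f (q2 ++ decRound q1) := by
  induction q1 with
  | nil => intro q2 f; simp [decRound]
  | cons x q1' ih =>
    intro q2 f
    obtain ⟨i, t⟩ := x
    have hL : ((i, t) :: q1').length + f = (q1'.length + f) + 1 := by simp; omega
    rw [hL, List.cons_append]
    show solutionLoop (q1'.length + f + 1) ((i, t) :: (q1' ++ q2)) = _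
    rw [solutionLoop, decRound_cons]
    by_cases h : t - 1 = 0
    · rw [if_neg (by simpa using h), if_pos h]
      exact ih q2 f
    · rw [if_pos (by simpa using h), if_neg h, List.append_assoc]
      rw [ih (q2 ++ [(i, t - 1)]) f, List.append_assoc]
      rfl

theorem partialLemma (q : List (Int × Int)) (s : Nat) (hs : s < q.length) :
    solutionLoop s q = q.drop s ++ decRound (q.take s) := by
  have h := roundLemma (q.take s) (q.drop s) 0
  rw [List.take_append_drop, List.length_take] at h
  rw [min_eq_left (le_of_lt hs)] at h
  simpa using h

theorem headIdx_cons (p : Int × Int) (l : List (Int × Int)) : headIdx (p :: l) = p.1 := by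
  cases p; rfl

-- the final partial round: after s < len(q) seconds the next food is q[s]
theorem finishLemma (q : List (Int × Int)) (hq : q ≠ []) (s : Nat) (hs : s < q.length) :
    headIdx (solutionLoop s q) = altFinish q (s : Int) := by
  rw [partialLemma q s hs, List.drop_eq_getElem_cons hs]
  rw [altFinish, if_neg hq, PySem.List.pyGet?_natCast, List.getElem?_eq_getElem hs]
  simp only [List.cons_append, headIdx_cons, Option.getD_some]

theorem mainAux : ∀ (f : Nat) (k : Nat) (q : List (Int × Int)), k < f →
    headIdx (solutionLoop k q) = altLoop f q (k : Int) := by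
  intro f
  induction f with
  | zero => intro k q hk; omega
  | succ f ih =>
    intro k q hk
    rw [altLoop]
    by_cases hq : q = []
    · subst hq
      rw [solutionLoop_nil, if_neg (by simp)]
      simp [altFinish, headIdx]
    · have hlen : 0 < q.length := List.length_pos_of_ne_nil hq
      by_cases hc : q.length ≤ k
      · rw [if_pos ⟨hq, by exact_mod_cast hc⟩]
        have hk' : k = q.length + (k - q.length) := by omega
        rw [hk']
        have hr := roundLemma q [] (k - q.length)
        rw [List.append_nil, List.nil_append] at hr
        rw [hr, decRound_eq_filter]
        have hcast : ((k : Nat) : Int) - ((q.length : Nat) : Int) = ((k - q.length : Nat) : Int) := by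
          push_cast [hc]; ring
        rw [← hk', hcast]
        exact ih (k - q.length) _ (by omega)
      · rw [if_neg (by push_neg; intro _; exact_mod_cast Nat.lt_of_not_le hc)]
        exact finishLemma q hq k (Nat.lt_of_not_le hc)

theorem enum_getElem : ∀ (xs : List Int) (s : Int) (j : Nat)
    (h : j < (PySem.List.enumerate xs s).length),
    (PySem.List.enumerate xs s)[j] =
      (s + (j : Int), xs[j]'(by simpa [PySem.List.length_enumerate] using h)) := by
  intro xs
  induction xs with
  | nil => intro s j h; simp [PySem.List.enumerate_nil] at h
  | cons x xs ih =>
    intro s j h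
    cases j with
    | zero => simp [PySem.List.enumerate_cons]
    | succ j =>
      have h' : j < (PySem.List.enumerate xs (s + 1)).length := by
        simpa [PySem.List.enumerate_cons] using h
      simp only [PySem.List.enumerate_cons, List.getElem_cons_succ]
      rw [ih (s + 1) j h']
      congr 1
      push_cast
      ring

theorem qInit (ft : List Int) :
    (List.range ft.length).map (fun (i : Nat) => ((i : Int) + 1, PySem.List.pyGetD ft (i : Int) 0)) =
      (PySem.List.enumerate ft 0).map (fun p => (p.1 + 1, p.2)) := by
  apply List.ext_getElem
  · simp [PySem.List.length_enumerate]
  · intro j h1 h2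
    have hj : j < ft.length := by simpa using h1
    simp only [List.getElem_map, List.getElem_range]
    rw [enum_getElem ft 0 j (by simpa [PySem.List.length_enumerate] using hj)]
    rw [PySem.List.pyGetD_natCast, List.getD_eq_getElem ft 0 hj]
    simp

-- ===== VERDICT (by name: the statement is the Claim_ definition above) =====
theorem solution_spec : Claim_equal_solution := by
  intro ft k _ hpre
  show solution ft k = solution_alt ft k
  unfold solution solution_alt
  rw [qInit ft]
  rcases hpre with hk | hft
  · rw [if_pos hk]
    have hcast : ((k.toNat : Nat) : Int) = k := Int.toNat_of_nonneg hk
    rw [← hcast]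
    exact mainAux (k.toNat + 1) k.toNat _ (by omega)
  · subst hft
    simp only [PySem.List.enumerate_nil, List.map_nil]
    rw [solutionLoop_nil]
    cases h : k.toNat + 1 with
    | zero => simp [altLoop, altFinish, headIdx]
    | succ f => simp [altLoop, altFinish, headIdx]
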